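-- pv_equiv track=rewrite | github.com/mattclarkdotnet/aoc2024 | 2.py | safe2
-- ===== SOURCE A (Python) =====
-- def safe1(l: list) -> bool:
--     diffs = [a-b for a, b in zip(l, l[1:])]
--     return all(d>=1 and d<=3 for d in diffs) or all(d>=-3 and d<=-1 for d in diffs)
--
-- def safe2(l: list) -> bool:
--     if safe1(l):
--         return True
--     else:
--         # Try removing each level and see if that makes things safe
--         for i in range(len(l)):
--             newlist = list(l)
--             del newlist[i]
--             if safe1(newlist):
--                 return True
--     return False
-- ===== SOURCE B (Python) =====
-- # O(n) single scan: find the FIRST adjacent pair violating the direction; only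
-- # removing one of its two elements can help, each checked in O(n) once.
--
-- def _up(a, b):
--     return 1 <= a - b <= 3
--
-- def _down(a, b):
--     return -3 <= a - b <= -1
--
-- def _chain(xs, ok):
--     return all(ok(a, b) for a, b in zip(xs, xs[1:]))
--
-- def _one_del(xs, ok):
--     for i in range(len(xs) - 1):
--         if not ok(xs[i], xs[i + 1]):
--             # first violation: only deleting xs[i] or xs[i+1] can fix it
--             del_a = (i == 0 or ok(xs[i - 1], xs[i + 1])) and _chain(xs[i + 1:], ok)
--             del_b = _chain(xs[i:i + 1] + xs[i + 2:], ok)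
--             return del_a or del_b
--     return True
--
-- def safe2(l: list) -> bool:
--     return _one_del(l, _up) or _one_del(l, _down)
-- ===== Notes on version B (the rewrite author's own statement) =====
-- stated objective: faster
-- what changed: Instead of re-checking the whole list after deleting every index (n full scans), B scans once per direction to the first violating adjacent pair and checks only the two deletions that can remove it.
import Mathlib
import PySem

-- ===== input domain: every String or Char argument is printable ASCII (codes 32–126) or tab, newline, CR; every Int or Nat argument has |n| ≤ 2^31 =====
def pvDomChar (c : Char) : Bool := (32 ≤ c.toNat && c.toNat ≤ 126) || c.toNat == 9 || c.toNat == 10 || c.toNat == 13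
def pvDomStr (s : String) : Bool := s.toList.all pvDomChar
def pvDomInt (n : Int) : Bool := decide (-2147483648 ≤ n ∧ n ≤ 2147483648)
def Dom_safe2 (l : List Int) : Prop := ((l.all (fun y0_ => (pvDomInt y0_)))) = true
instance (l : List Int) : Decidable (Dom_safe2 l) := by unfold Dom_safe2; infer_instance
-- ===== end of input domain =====

-- B replaces A's try-every-deletion O(n^2) scan by one pass per direction to the
-- first violating adjacent pair, checking only the two deletions that can fix it (O(n)).


-- ===== PORT A =====
-- safe1: diffs = [a-b for a,b in zip(l, l[1:])]; all in [1,3] or all in [-3,-1]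
def safe1 (l : List Int) : Bool :=
  let diffs := (List.zip l (PySem.List.slice l (some 1) none)).map (fun ab => ab.1 - ab.2)
  diffs.all (fun d => decide (1 ≤ d) && decide (d ≤ 3)) ||
  diffs.all (fun d => decide (-3 ≤ d) && decide (d ≤ -1))

-- if safe1(l): True; else loop i over range(len(l)), del newlist[i] (always in range), early-return;
-- the early-return-true loop is List.any
def safe2 (l : List Int) : Bool :=
  if safe1 l then true
  else (List.range l.length).any (fun i => safe1 (l.eraseIdx i))

-- ===== PORT B =====
def upB (a b : Int) : Bool := decide (1 ≤ a - b) && decide (a - b ≤ 3)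
def downB (a b : Int) : Bool := decide (-3 ≤ a - b) && decide (a - b ≤ -1)

-- _chain: all(ok(a,b) for a,b in zip(xs, xs[1:]))
def chainB (p : Int → Int → Bool) (xs : List Int) : Bool :=
  (List.zip xs (PySem.List.slice xs (some 1) none)).all (fun ab => p ab.1 ab.2)

-- the 'for i in range(len(xs)-1)' loop of _one_del, as recursion on i;
-- xs[i], xs[i+1], xs[i-1] are always in range here (and xs[i-1] only reached when i > 0,
-- since Python's 'or' short-circuits), so getD with a dummy default is exact
def oneDelGo (p : Int → Int → Bool) (xs : List Int) (i : Nat) : Bool :=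
  if i + 1 < xs.length then
    if p (xs.getD i 0) (xs.getD (i+1) 0) then oneDelGo p xs (i+1)
    else
      ((i == 0 || p (xs.getD (i-1) 0) (xs.getD (i+1) 0)) &&
        chainB p (PySem.List.slice xs (some ((i+1 : Nat) : Int)) none)) ||
      chainB p (PySem.List.slice xs (some ((i : Nat) : Int)) (some ((i+1 : Nat) : Int)) ++
                PySem.List.slice xs (some ((i+2 : Nat) : Int)) none)
  else true
termination_by xs.length - i

def safe2_alt (l : List Int) : Bool :=
  oneDelGo upB l 0 || oneDelGo downB l 0

-- ===== PRECONDITION & SPEC =====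
def Spec_safe2 (l : List Int) (out : Bool) : Prop := out = safe2_alt l
instance (l : List Int) (out : Bool) : Decidable (Spec_safe2 l out) := by unfold Spec_safe2; infer_instance

-- ===== CLAIM (what is proved, stated in full; the proofs are below) =====
def Claim_equal_safe2 : Prop := ∀ (l : List Int), Dom_safe2 l → Spec_safe2 l (safe2 l)

-- ===== LEMMAS AND PROOFS =====

-- structural "all adjacent pairs satisfy p" chain
def pchain (p : Int → Int → Bool) : List Int → Bool
  | a :: b :: t => p a b && pchain p (b :: t)
  | _ => true

lemma zip_tail_all (p : Int → Int → Bool) :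
    ∀ l : List Int, (List.zip l l.tail).all (fun ab => p ab.1 ab.2) = pchain p l := by
  intro l
  induction l with
  | nil => simp [pchain]
  | cons a l' ih =>
    cases l' with
    | nil => simp [pchain]
    | cons b t => simp [pchain, List.all_cons, ← ih]

lemma chainB_eq (p : Int → Int → Bool) (xs : List Int) : chainB p xs = pchain p xs := by
  rw [chainB, PySem.List.slice_from_one, zip_tail_all]

lemma safe1_eq (l : List Int) : safe1 l = (pchain upB l || pchain downB l) := by
  rw [safe1, PySem.List.slice_from_one]
  simp only [List.all_map]
  rw [← zip_tail_all upB l, ← zip_tail_all downB l]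
  rfl

lemma pchain_take_one (p : Int → Int → Bool) (l : List Int) : pchain p (l.take 1) = true := by
  cases l with
  | nil => simp [pchain]
  | cons a t => simp [pchain]

-- pchain over a snoc: prefix chain plus link from the last element
lemma pchain_concat (p : Int → Int → Bool) :
    ∀ (u : List Int) (y : Int),
      pchain p (u ++ [y]) =
        (pchain p u && (match u.getLast? with | none => true | some q => p q y)) := by
  intro u
  induction u with
  | nil => simp [pchain]
  | cons x u' ih =>
    intro y
    cases u' with
    | nil => simp [pchain]
    | cons z u'' =>
      have hih := ih y
      rw [List.cons_append] at hih
      simp only [List.cons_append, pchain, List.getLast?_cons_cons]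
      rw [hih, Bool.and_assoc]

-- split a chain at an interior element
lemma pchain_append_cons (p : Int → Int → Bool) :
    ∀ (u : List Int) (y : Int) (ys : List Int),
      pchain p (u ++ y :: ys) = (pchain p (u ++ [y]) && pchain p (y :: ys)) := by
  intro u
  induction u with
  | nil =>
    intro y ys
    cases ys <;> simp [pchain]
  | cons x u' ih =>
    intro y ys
    cases u' with
    | nil => simp [pchain]
    | cons z u'' =>
      have hih := ih y ys
      rw [List.cons_append] at hih
      simp only [List.cons_append, pchain]
      rw [hih, Bool.and_assoc]
      simp only [List.cons_append]

-- a violating adjacent pair kills the whole chain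
lemma pchain_adj_false (p : Int → Int → Bool) (u : List Int) (a b : Int) (v : List Int)
    (hab : p a b = false) : pchain p (u ++ a :: b :: v) = false := by
  rw [pchain_append_cons p u a (b :: v)]
  simp [pchain, hab]

lemma getLast?_take_succ (xs : List Int) (n : Nat) (h : n < xs.length) :
    (xs.take (n+1)).getLast? = some (xs[n]'h) := by
  have h1 : xs.take (n+1) = xs.take n ++ [xs[n]'h] := by
    rw [List.take_add_one, List.getElem?_eq_getElem h]; rfl
  rw [h1, List.getLast?_concat]

-- the A-side disjunction both programs compute
def oneSpec (p : Int → Int → Bool) (l : List Int) : Prop :=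
  pchain p l = true ∨ ∃ j < l.length, pchain p (l.eraseIdx j) = true

lemma oneDelGo_iff (p : Int → Int → Bool) (xs : List Int) :
    ∀ i, pchain p (xs.take (i+1)) = true →
      (oneDelGo p xs i = true ↔ oneSpec p xs) := by
  have key : ∀ (k i : Nat), xs.length - i ≤ k →
      pchain p (xs.take (i+1)) = true → (oneDelGo p xs i = true ↔ oneSpec p xs) := by
    intro k
    induction k with
    | zero =>
      intro i hk hinv
      rw [oneDelGo]
      have h : ¬ (i + 1 < xs.length) := by omega
      rw [if_neg h]
      simp only [true_iff]
      left
      have h4 : xs.take (i+1) = xs := List.take_of_length_le (by omega)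
      rwa [h4] at hinv
    | succ k IH =>
      intro i hk hinv
      rw [oneDelGo]
      by_cases h : i + 1 < xs.length
      · rw [if_pos h]
        have hi : i < xs.length := by omega
        have hia : xs.getD i 0 = xs[i]'hi := List.getD_eq_getElem xs 0 hi
        have hib : xs.getD (i+1) 0 = xs[i+1]'h := List.getD_eq_getElem xs 0 h
        -- decomposition xs = take i ++ xs[i] :: xs[i+1] :: drop (i+2)
        have hdrop : xs.drop i = xs.getD i 0 :: xs.getD (i+1) 0 :: xs.drop (i+2) := by
          rw [hia, hib, List.drop_eq_getElem_cons hi, List.drop_eq_getElem_cons h]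
        have hsplit : xs = xs.take i ++ xs.getD i 0 :: xs.getD (i+1) 0 :: xs.drop (i+2) := by
          conv_lhs => rw [← List.take_append_drop i xs]
          rw [hdrop]
        have hlen_take : (xs.take i).length = i := by
          rw [List.length_take]; omega
        have htake1 : xs.take (i+1) = xs.take i ++ [xs.getD i 0] := by
          rw [List.take_add_one, List.getElem?_eq_getElem hi, hia]; rfl
        have hpre : pchain p (xs.take i) = true := by
          have h2 := hinv
          rw [htake1, pchain_concat] at h2
          exact (Bool.and_eq_true_iff.mp h2).1
        by_cases hpab : p (xs.getD i 0) (xs.getD (i+1) 0) = true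
        · -- ok pair: loop continues; invariant extends to i+1
          rw [if_pos hpab]
          apply IH (i+1) (by omega)
          have h3 : xs.take (i+2) = xs.take (i+1) ++ [xs.getD (i+1) 0] := by
            rw [List.take_add_one (i := i+1), List.getElem?_eq_getElem h, hib]; rfl
          rw [h3, pchain_concat, hinv, htake1, List.getLast?_concat]
          simpa using hpab
        · -- first violation at (i, i+1)
          rw [if_neg hpab]
          have hpab' : p (xs.getD i 0) (xs.getD (i+1) 0) = false := by
            simpa using hpab
          -- normalize the two slice expressions
          have hs1 : PySem.List.slice xs (some ((i+1 : Nat) : Int)) none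
              = xs.getD (i+1) 0 :: xs.drop (i+2) := by
            rw [PySem.List.slice_from_natCast, List.drop_eq_getElem_cons h, hib]
          have hs2 : PySem.List.slice xs (some ((i : Nat) : Int)) (some ((i+1 : Nat) : Int))
              = [xs.getD i 0] := by
            rw [PySem.List.slice_natCast]
            rw [show i + 1 - i = 1 from by omega]
            rw [List.drop_eq_getElem_cons hi, hia]
            rfl
          have hs3 : PySem.List.slice xs (some ((i+2 : Nat) : Int)) none = xs.drop (i+2) :=
            PySem.List.slice_from_natCast xs (i+2)
          rw [hs1, hs2, hs3, chainB_eq, chainB_eq]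
          simp only [List.singleton_append]
          -- the bridge test equals the getLast?-match on take i
          have hbridge : (((i == 0 : Bool) || p (xs.getD (i-1) 0) (xs.getD (i+1) 0)) &&
                pchain p (xs.getD (i+1) 0 :: xs.drop (i+2))) = true
              ↔ ((match (xs.take i).getLast? with
                  | none => true
                  | some q => p q (xs.getD (i+1) 0)) = true
                 ∧ pchain p (xs.getD (i+1) 0 :: xs.drop (i+2)) = true) := by
            by_cases h0 : i = 0
            · subst h0
              simp
            · have hi1 : i - 1 < xs.length := by omega
              have htk : xs.take i = xs.take ((i-1)+1) := by congr 1; omega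
              rw [htk, getLast?_take_succ xs (i-1) hi1,
                List.getD_eq_getElem xs 0 hi1]
              simp [h0]
          rw [Bool.or_eq_true, hbridge]
          constructor
          · rintro (⟨hbr, hch⟩ | hch)
            · -- delete xs[i]  (j = i)
              refine Or.inr ⟨i, by omega, ?_⟩
              conv_lhs => rw [hsplit]
              rw [List.eraseIdx_append_of_length_le (by omega)]
              rw [show i - (xs.take i).length = 0 from by omega]
              rw [List.eraseIdx_cons_zero, pchain_append_cons, pchain_concat, hpre]
              simp only [Bool.true_and, Bool.and_eq_true]
              exact ⟨hbr, hch⟩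
            · -- delete xs[i+1]  (j = i+1)
              refine Or.inr ⟨i+1, by omega, ?_⟩
              conv_lhs => rw [hsplit]
              rw [List.eraseIdx_append_of_length_le (by omega)]
              rw [show i + 1 - (xs.take i).length = 1 from by omega]
              rw [List.eraseIdx_cons_succ, List.eraseIdx_cons_zero,
                pchain_append_cons, ← htake1, hinv]
              simpa [pchain] using hch
          · rintro (hch | ⟨j, hj, hch⟩)
            · exfalso
              rw [hsplit, pchain_adj_false p _ _ _ _ hpab'] at hch
              exact Bool.false_ne_true hch
            · rcases Nat.lt_or_ge j i with hji | hji
              · exfalso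
                rw [hsplit, List.eraseIdx_append_of_lt_length (by omega),
                  pchain_adj_false p _ _ _ _ hpab'] at hch
                exact Bool.false_ne_true hch
              · rcases Nat.lt_or_ge j (i+2) with hji2 | hji2
                · rw [hsplit, List.eraseIdx_append_of_length_le (by omega)] at hch
                  have hj01 : j = i ∨ j = i + 1 := by omega
                  rcases hj01 with rfl | rfl
                  · -- j = i : delete xs[i]
                    left
                    rw [show j - (xs.take j).length = 0 from by omega] at hch
                    rw [List.eraseIdx_cons_zero, pchain_append_cons, pchain_concat, hpre] at hch
                    simp only [Bool.true_and, Bool.and_eq_true] at hch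
                    exact hch
                  · -- j = i+1 : delete xs[i+1]
                    right
                    rw [show i + 1 - (xs.take i).length = 1 from by omega] at hch
                    rw [List.eraseIdx_cons_succ, List.eraseIdx_cons_zero,
                      pchain_append_cons, ← htake1, hinv] at hch
                    simpa [pchain] using hch
                · exfalso
                  rw [hsplit, List.eraseIdx_append_of_length_le (by omega)] at hch
                  rw [show j - (xs.take i).length = (j - i - 2) + 2 from by omega] at hch
                  simp only [List.eraseIdx_cons_succ] at hch
                  rw [pchain_adj_false p _ _ _ _ hpab'] at hch
                  exact Bool.false_ne_true hch
      · -- loop finished: no violation anywhere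
        rw [if_neg h]
        simp only [true_iff]
        left
        have h4 : xs.take (i+1) = xs := List.take_of_length_le (by omega)
        rwa [h4] at hinv
  intro i hinv
  exact key xs.length i (by omega) hinv

lemma safe2_iff (l : List Int) :
    safe2 l = true ↔ (oneSpec upB l ∨ oneSpec downB l) := by
  rw [safe2]
  by_cases h1 : safe1 l = true
  · rw [if_pos h1]
    simp only [true_iff]
    rw [safe1_eq, Bool.or_eq_true] at h1
    rcases h1 with h | h
    · exact Or.inl (Or.inl h)
    · exact Or.inr (Or.inl h)
  · rw [if_neg h1]
    rw [List.any_eq_true]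
    rw [safe1_eq, Bool.or_eq_true] at h1
    rw [not_or] at h1
    constructor
    · rintro ⟨i, hi, hs⟩
      rw [List.mem_range] at hi
      rw [safe1_eq, Bool.or_eq_true] at hs
      rcases hs with h | h
      · exact Or.inl (Or.inr ⟨i, hi, h⟩)
      · exact Or.inr (Or.inr ⟨i, hi, h⟩)
    · rintro (hU | hD)
      · rcases hU with h | ⟨j, hj, h⟩
        · exact absurd h h1.1
        · exact ⟨j, List.mem_range.mpr hj, by rw [safe1_eq]; simp [h]⟩
      · rcases hD with h | ⟨j, hj, h⟩
        · exact absurd h h1.2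
        · exact ⟨j, List.mem_range.mpr hj, by rw [safe1_eq]; simp [h]⟩

lemma safe2_alt_iff (l : List Int) :
    safe2_alt l = true ↔ (oneSpec upB l ∨ oneSpec downB l) := by
  rw [safe2_alt, Bool.or_eq_true,
    oneDelGo_iff upB l 0 (pchain_take_one upB l),
    oneDelGo_iff downB l 0 (pchain_take_one downB l)]

-- ===== VERDICT (by name: the statement is the Claim_ definition above) =====
theorem safe2_spec : Claim_equal_safe2 := by
  intro l _
  unfold Spec_safe2
  rw [Bool.eq_iff_iff, safe2_iff, safe2_alt_iff]
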